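-- pv_equiv track=rewrite | github.com/Alejandrox27/Estudiantes | proyecto1/notas_estudiantes/__main__.py | espacios_seguidos
-- ===== SOURCE A (Python) =====
-- def espacios_seguidos(string):
--     """
--     Esta función toma un string y pasa por cada uno de sus elementos,
--     sí hay dos o más espacios seguidos en el string devuelve True,
--     si no hay más de dos espacios seguidos en el string devuelve False.
--
--     Parameters:
--     string: texto que se quiere buscar espacios seguidos
--
--     Returns:
--     True: si encuentra dos o más espacios seguidos en el string
--     False: si no encuentra dos o más espacios seguidos
--     """
--
--     lista_texto = []
--     for l in string:
--         lista_texto.append(l)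
--     index1 = ''
--     index2 = ''
--
--     for e in lista_texto:
--         index1 = e
--         if index1 == index2 and index1 == ' ':
--             return True
--         index2 = e
--     return False
-- ===== SOURCE B (Python) =====
-- def espacios_seguidos(string):
--     """Devuelve True si hay dos espacios seguidos en el string."""
--     return '  ' in string
-- ===== Notes on version B (the rewrite author's own statement) =====
-- stated objective: idiomatic
-- what changed: Replaces the character-list copy and manual adjacent-pair state machine with a single substring-containment test for a double space.
import Mathlib
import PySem

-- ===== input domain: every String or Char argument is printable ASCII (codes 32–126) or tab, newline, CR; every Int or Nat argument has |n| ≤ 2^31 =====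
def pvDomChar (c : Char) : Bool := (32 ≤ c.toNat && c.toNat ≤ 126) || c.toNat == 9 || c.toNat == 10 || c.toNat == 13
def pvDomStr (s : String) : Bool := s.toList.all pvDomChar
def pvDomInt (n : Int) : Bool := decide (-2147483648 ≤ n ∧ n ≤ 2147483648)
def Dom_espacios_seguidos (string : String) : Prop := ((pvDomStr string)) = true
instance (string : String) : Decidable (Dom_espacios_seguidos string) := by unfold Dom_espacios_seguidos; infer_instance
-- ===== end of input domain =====

-- B replaces A's character-list copy and adjacent-pair state machine with one substring test ('  ' in string); idiomatic, same cost.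

-- ===== PORT A =====
-- A's second loop with its early return: index2 holds the previous element (a 1-char string; '' before the first step)
def espaciosLoopA (l : List Char) (index2 : String) : Bool :=
  match l with
  | [] => false
  | e :: rest =>
    let index1 := String.ofList [e]
    if index1 == index2 && index1 == " " then true
    else espaciosLoopA rest (String.ofList [e])

def espacios_seguidos (string : String) : Bool :=
  -- lista_texto: the copy loop yields exactly the list of characters of string
  espaciosLoopA string.toList ""

-- ===== PORT B =====
def espacios_seguidos_alt (string : String) : Bool :=
  PySem.Str.isIn "  " string

-- ===== PRECONDITION & SPEC =====
def Spec_espacios_seguidos (string : String) (out : Bool) : Prop := out = espacios_seguidos_alt string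
instance (string : String) (out : Bool) : Decidable (Spec_espacios_seguidos string out) := by unfold Spec_espacios_seguidos; infer_instance

-- ===== CLAIM (what is proved, stated in full; the proofs are below) =====
def Claim_equal_espacios_seguidos : Prop := ∀ (string : String), Dom_espacios_seguidos string → Spec_espacios_seguidos string (espacios_seguidos string)

-- ===== LEMMAS AND PROOFS =====

theorem spChar (c : Char) : String.ofList [c] = " " ↔ c = ' ' := by
  constructor
  · intro h
    have h2 := congrArg String.toList h
    simp at h2
    exact h2
  · rintro rfl; rfl

theorem prefix_one_space (rest : List Char) : [' '] <+: rest ↔ rest.head? = some ' ' := by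
  cases rest with
  | nil => simp
  | cons d t => simp [List.cons_prefix_cons, eq_comm]

theorem espaciosLoopA_iff (l : List Char) : ∀ prev : String,
    espaciosLoopA l prev = true ↔
      ((prev = " " ∧ l.head? = some ' ') ∨ [' ', ' '] <:+: l) := by
  induction l with
  | nil => intro prev; simp [espaciosLoopA]
  | cons c rest ih =>
    intro prev
    by_cases hc : c = ' '
    · subst hc
      by_cases hp : prev = " "
      · subst hp
        exact iff_of_true rfl (Or.inl ⟨rfl, rfl⟩)
      · have hcond : (String.ofList [' '] == prev) = false := by
          rw [beq_eq_false_iff_ne]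
          exact fun h => hp h.symm
        simp [espaciosLoopA, hcond, ih, hp, List.infix_cons_iff, prefix_one_space,
              show String.ofList [' '] = " " from rfl]
    · have hcond : (String.ofList [c] == " ") = false := by
        rw [beq_eq_false_iff_ne]
        exact fun h => hc ((spChar c).1 h)
      simp [espaciosLoopA, hcond, ih, spChar, hc, List.infix_cons_iff, List.cons_prefix_cons,
            Ne.symm hc]

theorem espacios_seguidos_eq (s : String) :
    espacios_seguidos s = espacios_seguidos_alt s := by
  have hb : espacios_seguidos_alt s = true ↔ [' ', ' '] <:+: s.toList := by
    rw [show espacios_seguidos_alt s = PySem.Chars.isIn [' ', ' '] s.toList from by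
      simp [espacios_seguidos_alt]]
    exact PySem.Chars.isIn_iff_infix _ _
  have ha : espacios_seguidos s = true ↔ [' ', ' '] <:+: s.toList := by
    rw [espacios_seguidos, espaciosLoopA_iff]
    simp [show ("" : String) ≠ " " from by decide]
  by_cases h : [' ', ' '] <:+: s.toList
  · rw [ha.2 h, hb.2 h]
  · have hA : espacios_seguidos s = false := by
      rw [Bool.eq_false_iff]; exact fun x => h (ha.1 x)
    have hB : espacios_seguidos_alt s = false := by
      rw [Bool.eq_false_iff]; exact fun x => h (hb.1 x)
    rw [hA, hB]

-- ===== VERDICT (by name: the statement is the Claim_ definition above) =====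
theorem espacios_seguidos_spec : Claim_equal_espacios_seguidos := by
  intro s _
  unfold Spec_espacios_seguidos
  exact espacios_seguidos_eq s
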